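-- pv_equiv track=rewrite | github.com/myashok/LeetCode | solutions_new/create_maximum_number/solution.py | max_number_in_list_of_size_s
-- ===== SOURCE A (Python) =====
-- def max_number_in_list_of_size_s(l1, s):
--     picked_index = -1
--     to_select = s
--     l1_size = len(l1)
--     ans = []
--     while to_select:
--         start = picked_index + 1
--         end = l1_size - (to_select - 1)
--         picked_index = max(range(start, end), key=l1.__getitem__)
--         ans.append(l1[picked_index])
--         to_select -= 1
--
--     return ans
-- ===== SOURCE B (Python) =====
-- def max_number_in_list_of_size_s(l1, s):
--     # monotonic stack: one left-to-right pass, popping smaller elements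
--     # while removals remain; then keep the first s entries
--     drop = len(l1) - s
--     stack = []
--     for x in l1:
--         while drop and stack and stack[-1] < x:
--             stack.pop()
--             drop -= 1
--         stack.append(x)
--     return stack[:s]
-- ===== Notes on version B (the rewrite author's own statement) =====
-- stated objective: faster
-- what changed: Replaced the per-pick argmax scan over the remaining window (one max(range(...)) per selected element) by a single left-to-right monotonic-stack pass that pops smaller elements while removals remain and then keeps the first s stack entries.
import Mathlib
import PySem

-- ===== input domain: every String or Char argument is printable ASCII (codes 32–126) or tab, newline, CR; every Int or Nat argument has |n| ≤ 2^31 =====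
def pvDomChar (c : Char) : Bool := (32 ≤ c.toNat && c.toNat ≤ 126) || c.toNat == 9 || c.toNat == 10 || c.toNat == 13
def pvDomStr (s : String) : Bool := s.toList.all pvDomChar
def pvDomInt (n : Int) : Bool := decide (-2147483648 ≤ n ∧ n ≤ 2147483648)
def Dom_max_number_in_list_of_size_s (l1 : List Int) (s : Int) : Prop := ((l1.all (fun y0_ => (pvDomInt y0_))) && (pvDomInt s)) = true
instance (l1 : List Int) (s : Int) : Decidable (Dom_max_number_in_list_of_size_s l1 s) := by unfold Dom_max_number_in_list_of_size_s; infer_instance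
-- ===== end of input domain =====

-- B replaces A's per-pick argmax scan by a single monotonic-stack pass (asymptotically faster).

-- ===== PORT A =====
-- max(range(start, stop), key=l1.__getitem__): first index with maximal value
-- (Python's max keeps the first maximal element; strict '>' in the fold does the same).
-- On an empty range Python raises ValueError; we return `start` there (outside Pre_).
def pvArgmax (l1 : List Int) (start stop : Int) : Int :=
  match PySem.List.pyRange start stop 1 with
  | [] => start
  | i :: rest =>
      rest.foldl (fun best j =>
        if PySem.List.pyGetD l1 best 0 < PySem.List.pyGetD l1 j 0 then j else best) i

-- the while loop of A; `while to_select:` counts down from s, modelled with fuel s.toNat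
-- (exact whenever s ≥ 0; for s < 0 Python raises inside the first iteration, outside Pre_).
def pvLoopA (l1 : List Int) (n : Int) : Nat → Int → Int → List Int → List Int
  | 0, _, _, ans => ans
  | Nat.succ k, to_select, picked_index, ans =>
      let start := picked_index + 1
      let stop := n - (to_select - 1)
      let p := pvArgmax l1 start stop
      pvLoopA l1 n k (to_select - 1) p (ans ++ [PySem.List.pyGetD l1 p 0])

def max_number_in_list_of_size_s (l1 : List Int) (s : Int) : List Int :=
  pvLoopA l1 (l1.length : Int) s.toNat s (-1) []

-- ===== PORT B =====
-- the stack is kept top-first (Python's append/pop at the right end become cons/tail);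
-- `while drop and stack and stack[-1] < x: stack.pop(); drop -= 1`
def pvPop (x : Int) : List Int → Int → (List Int × Int)
  | [], b => ([], b)
  | t :: rest, b => if b ≠ 0 ∧ t < x then pvPop x rest (b - 1) else (t :: rest, b)

def pvStep (p : List Int × Int) (x : Int) : List Int × Int :=
  match pvPop x p.1 p.2 with
  | (st, b) => (x :: st, b)

def max_number_in_list_of_size_s_alt (l1 : List Int) (s : Int) : List Int :=
  let drop : Int := (l1.length : Int) - s
  let r := l1.foldl pvStep ([], drop)
  PySem.List.slice r.1.reverse none (some s)   -- stack[:s] (stack in bottom-first order)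

-- ===== PRECONDITION & SPEC =====
-- exactly the inputs on which A returns: for s < 0 the argmax scan walks past the end
-- (IndexError), for s > len(l1) the first range is empty (ValueError from max).
def Pre_max_number_in_list_of_size_s (l1 : List Int) (s : Int) : Prop :=
  0 ≤ s ∧ s ≤ (l1.length : Int)
instance (l1 : List Int) (s : Int) : Decidable (Pre_max_number_in_list_of_size_s l1 s) := by
  unfold Pre_max_number_in_list_of_size_s; infer_instance

def pvWitness_max_number_in_list_of_size_s : List Int × Int := ([3, 1, 4, 1, 5], 3)

def Spec_max_number_in_list_of_size_s (l1 : List Int) (s : Int) (out : List Int) : Prop := out = max_number_in_list_of_size_s_alt l1 s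
instance (l1 : List Int) (s : Int) (out : List Int) : Decidable (Spec_max_number_in_list_of_size_s l1 s out) := by unfold Spec_max_number_in_list_of_size_s; infer_instance

-- ===== CLAIM (what is proved, stated in full; the proofs are below) =====
def Claim_equal_max_number_in_list_of_size_s : Prop := ∀ (l1 : List Int) (s : Int), Dom_max_number_in_list_of_size_s l1 s → Pre_max_number_in_list_of_size_s l1 s → Spec_max_number_in_list_of_size_s l1 s (max_number_in_list_of_size_s l1 s)

-- ===== LEMMAS AND PROOFS =====

-- index of the FIRST maximal element of a list (0 on [])
def fam : List Int → Nat
  | [] => 0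
  | x :: xs => if xs ≠ [] ∧ x < xs.getD (fam xs) 0 then fam xs + 1 else 0

lemma fam_lt : ∀ (l : List Int), l ≠ [] → fam l < l.length := by
  intro l hl
  match l with
  | x :: xs =>
    simp only [fam]
    split
    · next h => have := fam_lt xs h.1; simp; omega
    · simp

lemma fam_max : ∀ (l : List Int) (j : Nat), j < l.length → l.getD j 0 ≤ l.getD (fam l) 0 := by
  intro l j hj
  match l with
  | x :: xs =>
    simp only [fam]
    split
    · next h =>
      rcases h with ⟨hne, hlt⟩
      cases j with
      | zero => simpa using le_of_lt hlt
      | succ j => simpa using fam_max xs j (by simpa using hj)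
    · next h =>
      cases j with
      | zero => simp
      | succ j =>
        have hj' : j < xs.length := by simpa using hj
        have hne : xs ≠ [] := by intro he; rw [he] at hj'; simp at hj'
        have hle : ¬ x < xs.getD (fam xs) 0 := by tauto
        have := fam_max xs j hj'
        simp only [List.getD_cons_succ, List.getD_cons_zero]
        omega

lemma fam_first : ∀ (l : List Int) (j : Nat), j < fam l → l.getD j 0 < l.getD (fam l) 0 := by
  intro l j hj
  match l with
  | [] => simp [fam] at hj
  | x :: xs =>
    simp only [fam] at hj ⊢
    split at hj
    · next h =>
      simp only [if_pos h]
      cases j with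
      | zero => simpa using h.2
      | succ j => simpa using fam_first xs j (by omega)
    · omega

-- ---- A-side: the argmax fold computes start + fam(window) ----

lemma pvArgmax_fold :
    ∀ (k : Nat) (l1 : List Int) (b c bi : Int), 0 ≤ c → c + k = b → b ≤ (l1.length : Int) →
      0 ≤ bi → bi < (l1.length : Int) →
      (PySem.List.pyRange c b 1).foldl (fun best j =>
          if PySem.List.pyGetD l1 best 0 < PySem.List.pyGetD l1 j 0 then j else best) bi =
        if ((l1.drop c.toNat).take k) ≠ [] ∧
            PySem.List.pyGetD l1 bi 0 <
              ((l1.drop c.toNat).take k).getD (fam ((l1.drop c.toNat).take k)) 0 then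
          c + fam ((l1.drop c.toNat).take k)
        else bi := by
  intro k
  induction k with
  | zero =>
    intro l1 b c bi hc hcb hb hbi0 hbi1
    have hrange : PySem.List.pyRange c b 1 = [] := by
      rw [PySem.List.pyRange_one]
      have : (b - c).toNat = 0 := by omega
      simp [this]
    simp [hrange]
  | succ k ih =>
    intro l1 b c bi hc hcb hb hbi0 hbi1
    have hcb' : c < b := by push_cast at hcb; omega
    have hcn : c < (l1.length : Int) := by omega
    have hc1 : (c + 1).toNat = c.toNat + 1 := by omega
    have hih : ∀ bi' : Int, 0 ≤ bi' → bi' < (l1.length : Int) →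
        (PySem.List.pyRange (c + 1) b 1).foldl (fun best j =>
            if PySem.List.pyGetD l1 best 0 < PySem.List.pyGetD l1 j 0 then j else best) bi' =
          if ((l1.drop (c.toNat + 1)).take k) ≠ [] ∧
              PySem.List.pyGetD l1 bi' 0 <
                ((l1.drop (c.toNat + 1)).take k).getD (fam ((l1.drop (c.toNat + 1)).take k)) 0 then
            (c + 1) + fam ((l1.drop (c.toNat + 1)).take k)
          else bi' := by
      intro bi' h0 h1
      have := ih l1 b (c + 1) bi' (by omega) (by push_cast at hcb ⊢; omega) hb h0 h1
      rwa [hc1] at this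
    have hdrop : l1.drop c.toNat = l1.getD c.toNat 0 :: l1.drop (c.toNat + 1) := by
      rw [List.getD_eq_getElem l1 0 (by omega), List.drop_eq_getElem_cons (by omega)]
    have hw : (l1.drop c.toNat).take (k + 1) =
        l1.getD c.toNat 0 :: (l1.drop (c.toNat + 1)).take k := by
      rw [hdrop, List.take_succ_cons]
    have hgc : PySem.List.pyGetD l1 c 0 = l1.getD c.toNat 0 := by
      rw [show c = ((c.toNat : Nat) : Int) by omega, PySem.List.pyGetD_natCast]; congr 2; omega
    rw [PySem.List.pyRange_one_cons hcb', List.foldl_cons, hw, hgc]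
    generalize hWS : (l1.drop (c.toNat + 1)).take k = ws at hih ⊢
    generalize hX : l1.getD c.toNat 0 = x at hgc ⊢
    by_cases hbx : PySem.List.pyGetD l1 bi 0 < x
    · rw [if_pos hbx, hih c hc hcn, hgc]
      by_cases hwe : ws = []
      · subst hwe; simp [fam, hbx]
      · by_cases hxm : x < ws.getD (fam ws) 0
        · have hfam : fam (x :: ws) = fam ws + 1 := by rw [fam, if_pos ⟨hwe, hxm⟩]
          rw [if_pos ⟨hwe, hxm⟩,
            if_pos ⟨by simp, by rw [hfam, List.getD_cons_succ]; exact lt_trans hbx hxm⟩, hfam]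
          push_cast; ring
        · have hfam : fam (x :: ws) = 0 := by rw [fam, if_neg (by tauto)]
          rw [if_neg (by tauto),
            if_pos ⟨by simp, by rw [hfam, List.getD_cons_zero]; exact hbx⟩, hfam]
          simp
    · rw [if_neg hbx, hih bi hbi0 hbi1]
      have hbx' : x ≤ PySem.List.pyGetD l1 bi 0 := not_lt.mp hbx
      by_cases hwe : ws = []
      · subst hwe; simp [fam, hbx]
      · by_cases hxm : x < ws.getD (fam ws) 0
        · have hfam : fam (x :: ws) = fam ws + 1 := by rw [fam, if_pos ⟨hwe, hxm⟩]
          by_cases hbm : PySem.List.pyGetD l1 bi 0 < ws.getD (fam ws) 0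
          · rw [if_pos ⟨hwe, hbm⟩,
              if_pos ⟨by simp, by rw [hfam, List.getD_cons_succ]; exact hbm⟩, hfam]
            push_cast; ring
          · rw [if_neg (by tauto),
              if_neg (by rintro ⟨-, h⟩; rw [hfam, List.getD_cons_succ] at h; exact hbm h)]
        · have hfam : fam (x :: ws) = 0 := by rw [fam, if_neg (by tauto)]
          rw [if_neg (by rintro ⟨-, h⟩; exact hxm (lt_of_le_of_lt hbx' h)),
            if_neg (by rintro ⟨-, h⟩; rw [hfam, List.getD_cons_zero] at h; exact hbx h)]

lemma pvArgmax_eq_fam (l1 : List Int) (a b : Int) (ha : 0 ≤ a) (hab : a < b)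
    (hb : b ≤ (l1.length : Int)) :
    pvArgmax l1 a b = a + fam ((l1.drop a.toNat).take (b - a).toNat) := by
  have han : a < (l1.length : Int) := by omega
  have ha1 : (a + 1).toNat = a.toNat + 1 := by omega
  have hk : (b - a).toNat = (b - (a + 1)).toNat + 1 := by omega
  have hdrop : l1.drop a.toNat = l1.getD a.toNat 0 :: l1.drop (a.toNat + 1) := by
    rw [List.getD_eq_getElem l1 0 (by omega), List.drop_eq_getElem_cons (by omega)]
  have hw : (l1.drop a.toNat).take (b - a).toNat =
      l1.getD a.toNat 0 :: (l1.drop (a.toNat + 1)).take (b - (a + 1)).toNat := by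
    rw [hk, hdrop, List.take_succ_cons]
  have hga : PySem.List.pyGetD l1 a 0 = l1.getD a.toNat 0 := by
    rw [show a = ((a.toNat : Nat) : Int) by omega, PySem.List.pyGetD_natCast]; congr 2; omega
  have hfold := pvArgmax_fold ((b - (a + 1)).toNat) l1 b (a + 1) a (by omega) (by omega) hb ha han
  rw [ha1] at hfold
  simp only [pvArgmax, PySem.List.pyRange_one_cons hab]
  rw [hfold, hw, hga]
  generalize hWS : (l1.drop (a.toNat + 1)).take ((b - (a + 1)).toNat) = ws
  generalize hX : l1.getD a.toNat 0 = x
  by_cases hwe : ws = []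
  · subst hwe; simp [fam]
  · by_cases hxm : x < ws.getD (fam ws) 0
    · have hfam : fam (x :: ws) = fam ws + 1 := by rw [fam, if_pos ⟨hwe, hxm⟩]
      rw [if_pos ⟨hwe, hxm⟩, hfam]
      push_cast; ring
    · have hfam : fam (x :: ws) = 0 := by rw [fam, if_neg (by tauto)]
      rw [if_neg (by tauto), hfam]
      simp

-- ---- the greedy specification both programs compute ----
def G : Nat → List Int → List Int
  | 0, _ => []
  | s + 1, l =>
      let i := fam (l.take (l.length - s))
      l.getD i 0 :: G s (l.drop (i + 1))

-- ---- A-side: the while loop computes G ----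
lemma getD_take (l : List Int) (t j : Nat) (h : j < t) :
    (l.take t).getD j 0 = l.getD j 0 := by
  simp [List.getD_eq_getElem?_getD, List.getElem?_take, h]

lemma getD_drop (l : List Int) (m j : Nat) :
    (l.drop m).getD j 0 = l.getD (m + j) 0 := by
  simp [List.getD_eq_getElem?_getD, List.getElem?_drop]

lemma pvLoopA_eq_G :
    ∀ (k : Nat) (l : List Int) (p : Int) (ans : List Int), -1 ≤ p →
      (p + 1) + k ≤ (l.length : Int) →
      pvLoopA l (l.length : Int) k k p ans = ans ++ G k (l.drop (p + 1).toNat) := by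
  intro k
  induction k with
  | zero => intro l p ans _ _; simp [pvLoopA, G]
  | succ k ih =>
    intro l p ans hp hlen
    have h0 : (0:Int) ≤ p + 1 := by omega
    have hab : p + 1 < (l.length : Int) - k := by push_cast at hlen ⊢; omega
    have hb : (l.length : Int) - k ≤ (l.length : Int) := by omega
    have e1 : (((k+1 : Nat)) : Int) - 1 = (k : Int) := by push_cast; ring
    simp only [pvLoopA]
    rw [e1, pvArgmax_eq_fam l (p+1) ((l.length : Int) - k) h0 hab hb]
    set l' : List Int := l.drop (p+1).toNat with hl'
    have hlenl' : l'.length = l.length - (p+1).toNat := by rw [hl', List.length_drop]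
    have htake : l'.length - k = (((l.length : Int) - k) - (p+1)).toNat := by omega
    set w : List Int := l'.take ((((l.length : Int) - k) - (p+1)).toNat) with hwdef
    have hwlen : w.length = (((l.length : Int) - k) - (p+1)).toNat := by
      rw [hwdef, List.length_take]; omega
    have hwne : w ≠ [] := by
      intro he
      rw [he] at hwlen; simp at hwlen; omega
    set i : Nat := fam w with hidef
    have hiw : i < w.length := fam_lt w hwne
    have hi : (p + 1 + (i:Int)).toNat = (p+1).toNat + i := by omega
    have hv : PySem.List.pyGetD l (p + 1 + (i:Int)) 0 = l'.getD i 0 := by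
      rw [show p + 1 + (i:Int) = (((p+1).toNat + i : Nat) : Int) by omega,
        PySem.List.pyGetD_natCast, hl', getD_drop]
    have hdrop2 : l.drop (p + 1 + (i:Int) + 1).toNat = l'.drop (i+1) := by
      rw [hl', List.drop_drop,
        show (p + 1 + (i:Int) + 1).toNat = (i + 1) + (p+1).toNat by omega]
      congr 1
      omega
    have hih := ih l (p + 1 + (i:Int)) (ans ++ [PySem.List.pyGetD l (p + 1 + (i:Int)) 0])
      (by omega) (by push_cast at hlen ⊢; omega)
    rw [hih, hdrop2, hv]
    have hG : G (k+1) l' = l'.getD (fam (l'.take (l'.length - k))) 0 ::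
        G k (l'.drop (fam (l'.take (l'.length - k)) + 1)) := rfl
    rw [hG, htake, ← hwdef, ← hidef]
    simp

-- ---- B-side basic facts about pvPop / the fold ----

lemma pvPop_budget (x : Int) : ∀ (st : List Int) (b : Int),
    (pvPop x st b).2 - ((pvPop x st b).1.length : Int) = b - st.length := by
  intro st
  induction st with
  | nil => intro b; simp [pvPop]
  | cons t rest ih =>
    intro b
    simp only [pvPop]
    split
    · have := ih (b - 1); simp at this ⊢; omega
    · simp

lemma pvPop_nonneg (x : Int) : ∀ (st : List Int) (b : Int), 0 ≤ b → 0 ≤ (pvPop x st b).2 := by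
  intro st
  induction st with
  | nil => intro b hb; simpa [pvPop] using hb
  | cons t rest ih =>
    intro b hb
    simp only [pvPop]
    split
    · next h => exact ih (b - 1) (by omega)
    · simpa using hb

lemma pvPop_mem (x y : Int) : ∀ (st : List Int) (b : Int), y ∈ (pvPop x st b).1 → y ∈ st := by
  intro st
  induction st with
  | nil => intro b h; simpa [pvPop] using h
  | cons t rest ih =>
    intro b h
    simp only [pvPop] at h
    split at h
    · exact List.mem_cons_of_mem _ (ih _ h)
    · simpa using h

lemma pvPop_all (x : Int) : ∀ (st : List Int) (b : Int),
    (∀ y ∈ st, y < x) → (st.length : Int) ≤ b →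
    pvPop x st b = ([], b - st.length) := by
  intro st
  induction st with
  | nil => intro b _ _; simp [pvPop]
  | cons t rest ih =>
    intro b hall hb
    simp only [List.length_cons] at hb
    have hb0 : b ≠ 0 := by push_cast at hb; omega
    have ht : t < x := hall t (by simp)
    simp only [pvPop, if_pos (And.intro hb0 ht)]
    rw [ih (b - 1) (fun y hy => hall y (List.mem_cons_of_mem _ hy)) (by push_cast at hb ⊢; omega)]
    simp; push_cast; ring

lemma foldl_budget (p : List Int) : ∀ (st : List Int) (b : Int),
    (p.foldl pvStep (st, b)).2 - ((p.foldl pvStep (st, b)).1.length : Int) =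
      b - st.length - p.length := by
  induction p with
  | nil => intro st b; simp
  | cons x xs ih =>
    intro st b
    have h := pvPop_budget x st b
    have := ih (x :: (pvPop x st b).1) (pvPop x st b).2
    simp only [List.foldl_cons, pvStep] at *
    simp at this ⊢
    omega

lemma foldl_mem (p : List Int) : ∀ (st : List Int) (b : Int) (y : Int),
    y ∈ (p.foldl pvStep (st, b)).1 → y ∈ st ∨ y ∈ p := by
  induction p with
  | nil => intro st b y h; simp at h; exact Or.inl h
  | cons x xs ih =>
    intro st b y h
    simp only [List.foldl_cons, pvStep] at h
    rcases ih _ _ y h with h' | h'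
    · rcases List.mem_cons.mp h' with rfl | h''
      · exact Or.inr (by simp)
      · exact Or.inl (pvPop_mem x y st b h'')
    · exact Or.inr (List.mem_cons_of_mem _ h')

-- ---- B-side: the freeze lemma (a bottom element nothing can ever pop) ----

lemma pvPop_freeze (x m : Int) : ∀ (st : List Int) (b : Int), 0 ≤ b →
    (m < x → b ≤ (st.length : Int)) →
    pvPop x (st ++ [m]) b = ((pvPop x st b).1 ++ [m], (pvPop x st b).2) := by
  intro st
  induction st with
  | nil =>
    intro b hb h
    simp only [List.nil_append, pvPop]
    split
    · next hc => exfalso; have := h hc.2; simp at this; omega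
    · simp [pvPop]
  | cons t rest ih =>
    intro b hb h
    simp only [List.cons_append, pvPop]
    split
    · next hc =>
      exact ih (b - 1) (by omega) (fun hm => by have := h hm; simp at this ⊢; omega)
    · simp

lemma foldl_freeze (m : Int) : ∀ (l' : List Int) (st : List Int) (b : Int), 0 ≤ b →
    (∀ j, j < l'.length → m < l'.getD j 0 → b ≤ (st.length : Int) + j) →
    l'.foldl pvStep (st ++ [m], b) =
      ((l'.foldl pvStep (st, b)).1 ++ [m], (l'.foldl pvStep (st, b)).2) := by
  intro l'
  induction l' with
  | nil => intro st b _ _; simp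
  | cons x xs ih =>
    intro st b hb h
    have h0 : m < x → b ≤ (st.length : Int) := by
      intro hm; simpa using h 0 (by simp) (by simpa using hm)
    simp only [List.foldl_cons, pvStep, pvPop_freeze x m st b hb h0]
    have hbud := pvPop_budget x st b
    exact ih (x :: (pvPop x st b).1) (pvPop x st b).2 (pvPop_nonneg x st b hb)
      (fun j hj hm => by
        have := h (j + 1) (by simpa using hj) (by simpa using hm)
        simp at this ⊢
        omega)

-- ---- B-side: processing the prefix up to the first maximum ----

lemma foldl_prefix (l : List Int) (i : Nat) (b : Int)
    (hfirst : ∀ j, j < i → l.getD j 0 < l.getD i 0) (hi : i < l.length)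
    (hb : (i : Int) ≤ b) :
    (l.take (i + 1)).foldl pvStep ([], b) = ([l.getD i 0], b - i) := by
  have htake : l.take (i+1) = l.take i ++ [l.getD i 0] := by
    rw [List.take_succ, List.getElem?_eq_getElem hi, List.getD_eq_getElem l 0 hi]
    rfl
  rw [htake, List.foldl_append]
  have hmem : ∀ y ∈ ((l.take i).foldl pvStep ([], b)).1, y < l.getD i 0 := by
    intro y hy
    rcases foldl_mem (l.take i) [] b y hy with h | h
    · simp at h
    · rcases List.mem_iff_getElem.mp h with ⟨j, hj, rfl⟩
      have hj' : j < i := by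
        have := hj; rw [List.length_take] at this; omega
      have hji : j < l.length := by omega
      have hjt : j < (l.take i).length := hj
      calc (l.take i)[j] = (l.take i).getD j 0 := (List.getD_eq_getElem _ 0 hj).symm
        _ = l.getD j 0 := getD_take l i j hj'
        _ < l.getD i 0 := hfirst j hj'
  have hbud := foldl_budget (l.take i) [] b
  have hlt : ((l.take i).length : Int) = i := by
    rw [List.length_take]; push_cast; omega
  rw [hlt] at hbud
  simp only [List.length_nil] at hbud
  simp only [List.foldl_cons, List.foldl_nil, pvStep]
  rw [pvPop_all (l.getD i 0) _ _ hmem (by omega)]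
  have hfin : ((l.take i).foldl pvStep ([], b)).2 -
      (((l.take i).foldl pvStep ([], b)).1.length : Int) = b - i := by omega
  rw [hfin]

def runStk (s : Nat) (l : List Int) : List Int :=
  ((l.foldl pvStep ([], (l.length : Int) - (s : Int))).1.reverse).take s

lemma runStk_step (l : List Int) (s : Nat) (hs : s + 1 ≤ l.length) :
    runStk (s + 1) l =
      (let i := fam (l.take (l.length - s))
       l.getD i 0 :: runStk s (l.drop (i + 1))) := by
  show runStk (s+1) l = l.getD (fam (l.take (l.length - s))) 0 ::
    runStk s (l.drop (fam (l.take (l.length - s)) + 1))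
  have hlne : l ≠ [] := by intro he; subst he; simp at hs
  set i : Nat := fam (l.take (l.length - s)) with hidef
  have hwne : l.take (l.length - s) ≠ [] := by
    simp only [ne_eq, List.take_eq_nil_iff, not_or]
    exact ⟨by omega, hlne⟩
  have hiw : i < (l.take (l.length - s)).length := fam_lt _ hwne
  rw [List.length_take] at hiw
  have hilt : i < l.length - s := by omega
  have hfirst : ∀ j, j < i → l.getD j 0 < l.getD i 0 := by
    intro j hj
    have h := fam_first (l.take (l.length - s)) j hj
    rwa [getD_take l _ j (by omega), getD_take l _ i (by omega)] at h
  have hmax : ∀ j, j < l.length - s → l.getD j 0 ≤ l.getD i 0 := by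
    intro j hj
    have h := fam_max (l.take (l.length - s)) j (by rw [List.length_take]; omega)
    rwa [getD_take l _ j (by omega), getD_take l _ i (by omega)] at h
  unfold runStk
  set d : Int := (l.length : Int) - ((s+1 : Nat) : Int) with hddef
  have hd : d = (l.length : Int) - (s : Int) - 1 := by rw [hddef]; push_cast; ring
  have hsplit : l.foldl pvStep ([], d) =
      (l.drop (i+1)).foldl pvStep ((l.take (i+1)).foldl pvStep ([], d)) := by
    conv_lhs => rw [← List.take_append_drop (i+1) l]
    rw [List.foldl_append]
  have hpre : (l.take (i+1)).foldl pvStep ([], d) = ([l.getD i 0], d - i) :=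
    foldl_prefix l i d hfirst (by omega) (by omega)
  have hcond : ∀ j, j < (l.drop (i+1)).length →
      l.getD i 0 < (l.drop (i+1)).getD j 0 → d - i ≤ (([] : List Int).length : Int) + j := by
    intro j hj hmlt
    rw [getD_drop] at hmlt
    simp only [List.length_nil, Nat.cast_zero, zero_add]
    by_contra hcon
    push_neg at hcon
    have : i + 1 + j < l.length - s := by omega
    exact absurd (hmax (i+1+j) this) (not_le.mpr hmlt)
  have hfr := foldl_freeze (l.getD i 0) (l.drop (i+1)) [] (d - i) (by omega) hcond
  simp only [List.nil_append] at hfr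
  rw [hsplit, hpre, hfr]
  have hbud : ((l.drop (i+1)).length : Int) - (s : Int) = d - i := by
    rw [List.length_drop]; omega
  rw [hbud]
  simp [List.take_succ_cons]

lemma G_eq_runStk : ∀ (s : Nat) (l : List Int), s ≤ l.length → G s l = runStk s l := by
  intro s
  induction s with
  | zero => intro l _; simp [G, runStk]
  | succ s ih =>
    intro l hs
    rw [runStk_step l s hs]
    simp only [G]
    have hw : l.take (l.length - s) ≠ [] := by
      simp only [ne_eq, List.take_eq_nil_iff, not_or]
      exact ⟨by omega, by intro he; subst he; simp at hs⟩
    have hf := fam_lt _ hw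
    rw [List.length_take] at hf
    congr 1
    apply ih
    rw [List.length_drop]
    omega

-- ===== VERDICT (by name: the statement is the Claim_ definition above) =====
theorem max_number_in_list_of_size_s_spec : Claim_equal_max_number_in_list_of_size_s := by
  intro l1 s _ hpre
  obtain ⟨hs0, hsn⟩ := hpre
  unfold Spec_max_number_in_list_of_size_s
  have hcast : ((s.toNat : Nat) : Int) = s := by omega
  have hA : max_number_in_list_of_size_s l1 s = G s.toNat l1 := by
    have h := pvLoopA_eq_G s.toNat l1 (-1) [] (by omega) (by push_cast; omega)
    rw [hcast] at h
    simp only [show ((-1 : Int) + 1) = 0 from by ring, Int.toNat_zero, List.drop_zero,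
      List.nil_append] at h
    exact h
  have hB : max_number_in_list_of_size_s_alt l1 s = runStk s.toNat l1 := by
    simp only [max_number_in_list_of_size_s_alt, runStk, hcast]
    simp [PySem.List.slice_to, hs0]
  rw [hA, hB, G_eq_runStk s.toNat l1 (by omega)]
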